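-- pv_equiv track=rewrite | github.com/jricardo-um/analisis-datos-omicos-trabajo-2 | fase_2/sars_cov/flow_3/compare.py | fuzzpro_print
-- ===== SOURCE A (Python) =====
-- import itertools
-- import collections
--
-- def sliding_window( iterable, n ):
-- 	# sliding_window('ABCDEFG', 4) --> ABCD BCDE CDEF DEFG
-- 	it = iter( iterable )
-- 	window = collections.deque( itertools.islice( it, n ), maxlen=n )
-- 	if len( window ) == n:
-- 		yield tuple( window )
-- 	for x in it:
-- 		window.append( x )
-- 		yield tuple( window )
--
-- def fuzzpro_print( l, window=7, margin=2 ):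
-- 	s = 0
-- 	for x in sliding_window( l, window ):
-- 		if sum( c != '=' for c in x ) > margin: s = window
-- 		aa = x[ 0 ] if x[ 0 ] != '=' else 'x'
-- 		if s:
-- 			yield '\x1b[33m' + aa + '\x1b[0m'
-- 			s -= 1
-- 		else:
-- 			yield aa
-- ===== SOURCE B (Python) =====
-- def fuzzpro_print(l, window=7, margin=2):
--     # O(n): maintain the window's non-'=' count incrementally and the index of
--     # the last window that exceeded margin; highlight while within `window` of it.
--     n = len(l)
--     cnt = sum(c != '=' for c in l[:window])
--     last = None
--     for i in range(n - window + 1):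
--         if i > 0:
--             cnt += (l[i + window - 1] != '=') - (l[i - 1] != '=')
--         if cnt > margin:
--             last = i
--         aa = l[i] if l[i] != '=' else 'x'
--         if last is not None and i - last < window:
--             yield '\x1b[33m' + aa + '\x1b[0m'
--         else:
--             yield aa
-- ===== Notes on version B (the rewrite author's own statement) =====
-- stated objective: faster
-- what changed: B replaces the per-position recount of non-'=' characters over each length-`window` tuple (built via an explicit deque sliding_window generator) with a single pass that updates the mismatch count incrementally as the window slides and tracks only the index of the last over-margin window to decide highlighting.
import Mathlib
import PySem

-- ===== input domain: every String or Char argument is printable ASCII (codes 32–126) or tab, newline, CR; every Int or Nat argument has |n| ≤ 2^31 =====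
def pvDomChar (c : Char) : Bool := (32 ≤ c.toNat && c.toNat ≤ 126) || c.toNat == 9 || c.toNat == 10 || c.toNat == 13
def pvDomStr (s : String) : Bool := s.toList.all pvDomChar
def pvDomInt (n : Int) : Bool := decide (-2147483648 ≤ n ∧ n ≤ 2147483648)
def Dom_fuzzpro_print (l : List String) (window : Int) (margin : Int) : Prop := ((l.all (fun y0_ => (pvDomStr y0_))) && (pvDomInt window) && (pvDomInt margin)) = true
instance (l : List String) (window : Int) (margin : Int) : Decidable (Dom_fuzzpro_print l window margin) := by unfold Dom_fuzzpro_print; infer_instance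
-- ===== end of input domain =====

-- B replaces A's per-window recount (O(n·window)) by one pass that updates the
-- mismatch count incrementally and remembers only the last over-margin index;
-- both Pythons are generators, equivalence is about the sequence of yielded values.

-- ===== PORT A =====
-- sliding_window: deque of maxlen n, modelled as a list keeping the last n elements
def pvSlidingWindow (l : List String) (n : Nat) : List (List String) :=
  let w0 := l.take n
  let rest := l.drop n
  let init : List (List String) × List String :=
    (if w0.length = n then [w0] else [], w0)
  (rest.foldl (fun acc x =>
      ((acc.1 ++ [(acc.2 ++ [x]).drop (acc.2.length + 1 - n)]),
       (acc.2 ++ [x]).drop (acc.2.length + 1 - n))) init).1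

-- loop body of A: state = (yielded so far, s)
def pvStepA (window margin : Int) (acc : List String × Int) (x : List String) :
    List String × Int :=
  let s : Int := if ((x.countP (fun c => decide (c ≠ "="))) : Int) > margin then window else acc.2
  -- x[0]: within Pre_ every window is nonempty, so headD's default is never used
  let aa := if x.headD "" ≠ "=" then x.headD "" else "x"
  if s ≠ 0 then (acc.1 ++ ["\x1b[33m" ++ aa ++ "\x1b[0m"], s - 1)
  else (acc.1 ++ [aa], s)

def fuzzpro_print (l : List String) (window : Int) (margin : Int) : List String :=
  ((pvSlidingWindow l window.toNat).foldl (pvStepA window margin) ([], 0)).1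

-- ===== PORT B =====
-- loop body of B: state = (yielded so far, running mismatch count, last trigger index)
def pvStepB (l : List String) (w : Nat) (margin : Int)
    (acc : List String × Int × Option Nat) (i : Nat) : List String × Int × Option Nat :=
  let cnt : Int :=
    if i > 0 then
      acc.2.1 + (if l.getD (i + w - 1) "" ≠ "=" then 1 else 0)
              - (if l.getD (i - 1) "" ≠ "=" then 1 else 0)
    else acc.2.1
  let last := if cnt > margin then some i else acc.2.2
  let aa := if l.getD i "" ≠ "=" then l.getD i "" else "x"
  let hl := match last with | some j => decide (i - j < w) | none => false
  (acc.1 ++ [if hl = true then "\x1b[33m" ++ aa ++ "\x1b[0m" else aa], cnt, last)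

def fuzzpro_print_alt (l : List String) (window : Int) (margin : Int) : List String :=
  let w := window.toNat
  let cnt0 : Int := ((l.take w).countP (fun c => decide (c ≠ "=")) : Int)
  let N := ((l.length : Int) - window + 1).toNat
  ((List.range N).foldl (pvStepB l w margin) ([], cnt0, none)).1

-- ===== PRECONDITION & SPEC =====
-- A raises on window ≤ 0 (ValueError from deque(maxlen<0); IndexError from x[0] on
-- the empty tuples produced when window = 0); exactly those inputs are excluded.
def Pre_fuzzpro_print (l : List String) (window : Int) (margin : Int) : Prop :=
  1 ≤ window
instance (l : List String) (window : Int) (margin : Int) :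
    Decidable (Pre_fuzzpro_print l window margin) := by
  unfold Pre_fuzzpro_print; infer_instance

def pvWitness_fuzzpro_print : List String × Int × Int := (["A", "=", "=", "C", "="], 2, 1)

def Spec_fuzzpro_print (l : List String) (window : Int) (margin : Int) (out : List String) : Prop := out = fuzzpro_print_alt l window margin
instance (l : List String) (window : Int) (margin : Int) (out : List String) : Decidable (Spec_fuzzpro_print l window margin out) := by unfold Spec_fuzzpro_print; infer_instance

-- ===== CLAIM (what is proved, stated in full; the proofs are below) =====
def Claim_equal_fuzzpro_print : Prop := ∀ (l : List String) (window : Int) (margin : Int), Dom_fuzzpro_print l window margin → Pre_fuzzpro_print l window margin → Spec_fuzzpro_print l window margin (fuzzpro_print l window margin)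

-- ===== LEMMAS AND PROOFS =====

-- mismatch count of the window starting at i
def pvCnt (l : List String) (w i : Nat) : Nat :=
  ((l.drop i).take w).countP (fun c => decide (c ≠ "="))

-- whether window i triggers the highlight (abbrev so that all ite instances align)
abbrev pvTrig (l : List String) (w : Nat) (margin : Int) (i : Nat) : Prop :=
  (pvCnt l w i : Int) > margin

-- last trigger index strictly below i (B's `last` state)
def pvLast (l : List String) (w : Nat) (margin : Int) : Nat → Option Nat
  | 0 => none
  | i + 1 => if pvTrig l w margin i then some i else pvLast l w margin i

-- A's countdown state s before step i
def pvS (l : List String) (w : Nat) (margin window : Int) : Nat → Int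
  | 0 => 0
  | i + 1 =>
    let s := if pvTrig l w margin i then window else pvS l w margin window i
    if s ≠ 0 then s - 1 else s

-- whether position i is highlighted
def pvHl (l : List String) (w : Nat) (margin : Int) (i : Nat) : Bool :=
  match pvLast l w margin (i + 1) with
  | some j => decide (i - j < w)
  | none => false

-- the common value yielded at position i
def pvOut (l : List String) (w : Nat) (margin : Int) (i : Nat) : String :=
  let aa := if l.getD i "" ≠ "=" then l.getD i "" else "x"
  if pvHl l w margin i then "\x1b[33m" ++ aa ++ "\x1b[0m" else aa

lemma pv_last_lt (l : List String) (w : Nat) (margin : Int) :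
    ∀ i j, pvLast l w margin i = some j → j < i := by
  intro i
  induction i with
  | zero => intro j h; simp [pvLast] at h
  | succ i ih =>
    intro j h
    by_cases ht : pvTrig l w margin i
    · simp [pvLast, ht] at h; omega
    · simp [pvLast, ht] at h; exact Nat.lt_succ_of_lt (ih j h)

-- standalone arithmetic facts (elaborated fresh so that omega parses them)
lemma pv_arith1 (window : Int) (hw : 1 ≤ window) :
    (if window ≠ 0 then window - 1 else window)
      = if ((1 : Nat) : Int) < window then window - ((1 : Nat) : Int) else 0 := by
  split_ifs <;> omega

lemma pv_arith2 (window : Int) (i j : Nat) (hw : 1 ≤ window) (hj : j < i) :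
    (if (if ((i - j : Nat) : Int) < window
          then window - ((i - j : Nat) : Int) else 0) ≠ 0
     then (if ((i - j : Nat) : Int) < window
          then window - ((i - j : Nat) : Int) else 0) - 1
     else (if ((i - j : Nat) : Int) < window
          then window - ((i - j : Nat) : Int) else 0))
      = if ((i + 1 - j : Nat) : Int) < window
        then window - ((i + 1 - j : Nat) : Int) else 0 := by
  split_ifs <;> omega

lemma pv_arith3 (w : Nat) (window : Int) (i j : Nat) (hwn : (w : Int) = window) (hj : j < i) :
    ((if ((i - j : Nat) : Int) < window
       then window - ((i - j : Nat) : Int) else 0) ≠ 0) ↔ (i - j < w) := by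
  split_ifs <;> omega

lemma pv_s_eq (l : List String) (w : Nat) (margin window : Int) (hw : 1 ≤ window) :
    ∀ i, pvS l w margin window i
      = (match pvLast l w margin i with
         | none => 0
         | some j => if ((i - j : Nat) : Int) < window
                     then window - ((i - j : Nat) : Int) else 0) := by
  intro i
  induction i with
  | zero => simp [pvS, pvLast]
  | succ i ih =>
    by_cases ht : pvTrig l w margin i
    · simp only [pvS, pvLast, if_pos ht]
      rw [show i + 1 - i = 1 from by omega]
      exact pv_arith1 window hw
    · simp only [pvS, pvLast, if_neg ht]
      rw [ih]
      rcases hlast : pvLast l w margin i with _ | j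
      · simp
      · exact pv_arith2 window i j hw (pv_last_lt l w margin i j hlast)

lemma pv_hl_iff (l : List String) (w : Nat) (margin window : Int)
    (hw : 1 ≤ window) (hwn : (w : Int) = window) (i : Nat) :
    ((if pvTrig l w margin i then window else pvS l w margin window i) ≠ 0)
      ↔ pvHl l w margin i = true := by
  have hw1 : 1 ≤ w := by omega
  unfold pvHl
  by_cases ht : pvTrig l w margin i
  · simp only [pvLast, if_pos ht, Nat.sub_self, decide_eq_true_eq]
    constructor
    · intro _; omega
    · intro _; omega
  · simp only [pvLast, if_neg ht]
    rw [pv_s_eq l w margin window hw i]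
    rcases hlast : pvLast l w margin i with _ | j
    · simp
    · simp only [decide_eq_true_eq]
      exact pv_arith3 w window i j hwn (pv_last_lt l w margin i j hlast)

lemma pv_slice_head (l : List String) (w i : Nat) (hw : 1 ≤ w) (hi : i < l.length) :
    ((l.drop i).take w).headD "" = l.getD i "" := by
  obtain ⟨k, rfl⟩ : ∃ k, w = k + 1 := ⟨w - 1, by omega⟩
  rw [List.drop_eq_getElem_cons hi, List.getD_eq_getElem l "" hi]
  rfl

lemma pv_cnt_slide (l : List String) (w k : Nat) (h : k + w < l.length) :
    (pvCnt l w (k + 1) : Int)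
      = pvCnt l w k + (if l.getD (k + w) "" ≠ "=" then 1 else 0)
                    - (if l.getD k "" ≠ "=" then 1 else 0) := by
  have hk : k < l.length := by omega
  have e1 : (l.drop k).take (w + 1) = l[k] :: (l.drop (k + 1)).take w := by
    rw [List.drop_eq_getElem_cons hk, List.take_succ_cons]
  have e2 : (l.drop k).take (w + 1) = (l.drop k).take w ++ [l[k + w]] := by
    rw [List.take_add_one]
    congr 1
    rw [List.getElem?_drop, List.getElem?_eq_getElem h]
    rfl
  have c1 := congrArg (List.countP (fun c => decide (c ≠ "="))) e1
  rw [e2] at c1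
  simp only [List.countP_cons, List.countP_append] at c1
  unfold pvCnt
  rw [List.getD_eq_getElem l "" hk, List.getD_eq_getElem l "" h]
  by_cases h1 : l[k] = "=" <;> by_cases h2 : l[k + w] = "=" <;>
    simp [h1, h2] at c1 ⊢ <;> omega

-- the deque fold produces exactly the successive slices
lemma pv_wind_fold (w : Nat) (hw : 1 ≤ w) :
    ∀ (t : List String) (pre : List (List String)) (cur : List String), cur.length = w →
      (t.foldl (fun (acc : List (List String) × List String) x =>
          ((acc.1 ++ [(acc.2 ++ [x]).drop (acc.2.length + 1 - w)]),
           (acc.2 ++ [x]).drop (acc.2.length + 1 - w))) (pre, cur)).1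
        = pre ++ (List.range t.length).map (fun i => ((cur ++ t).drop (i + 1)).take w) := by
  intro t
  induction t with
  | nil => intro pre cur hc; simp
  | cons x t ih =>
    intro pre cur hc
    have h1 : cur.length + 1 - w = 1 := by omega
    have hwnd : ((cur ++ [x]).drop 1).length = w := by simp [hc]
    simp only [List.foldl_cons, h1]
    rw [ih (pre ++ [(cur ++ [x]).drop 1]) ((cur ++ [x]).drop 1) hwnd]
    have hdrop : ∀ i, (cur ++ x :: t).drop (i + 1) = (((cur ++ [x]).drop 1) ++ t).drop i := by
      intro i
      rw [show cur ++ x :: t = (cur ++ [x]) ++ t by simp,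
        ← List.drop_append_of_le_length (by simp), List.drop_drop, Nat.add_comm 1 i]
    rw [List.length_cons, List.range_succ_eq_map]
    simp only [List.map_cons, List.map_map, List.append_assoc, List.cons_append,
      List.nil_append]
    congr 1
    congr 1
    · rw [hdrop 0, List.drop_zero]
      exact (List.take_left' hwnd).symm
    · apply List.map_congr_left
      intro i _
      simp only [Function.comp_apply]
      rw [hdrop (i + 1)]

lemma pv_slidingWindow_eq (l : List String) (w : Nat) (hw : 1 ≤ w) :
    pvSlidingWindow l w
      = (List.range (l.length + 1 - w)).map (fun i => (l.drop i).take w) := by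
  simp only [pvSlidingWindow]
  by_cases hlen : w ≤ l.length
  · have hlen' : (l.take w).length = w := by simp; omega
    rw [if_pos hlen']
    rw [pv_wind_fold w hw (l.drop w) [l.take w] (l.take w) hlen']
    rw [List.take_append_drop]
    have hN : l.length + 1 - w = (l.length - w) + 1 := by omega
    rw [hN, List.range_succ_eq_map]
    simp only [List.map_cons, List.map_map, List.length_drop, List.cons_append,
      List.nil_append, List.drop_zero]
    rfl
  · have h0 : l.take w = l := List.take_of_length_le (by omega)
    have h1 : ¬ ((l.take w).length = w) := by rw [h0]; omega
    rw [if_neg h1]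
    have h2 : l.drop w = [] := List.drop_eq_nil_of_le (by omega)
    rw [h2]
    have h3 : l.length + 1 - w = 0 := by omega
    rw [h3]
    simp

lemma pv_foldA (l : List String) (window margin : Int) (w : Nat)
    (hw : 1 ≤ window) (hwn : (w : Int) = window) :
    ∀ N, (∀ i, i < N → i + w ≤ l.length) →
      ((List.range N).map (fun i => (l.drop i).take w)).foldl
          (pvStepA window margin) (([] : List String), (0 : Int))
        = ((List.range N).map (pvOut l w margin), pvS l w margin window N) := by
  intro N
  induction N with
  | zero => intro _; simp [pvS]
  | succ N ih =>
    intro hN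
    have hw1 : 1 ≤ w := by omega
    have hiw : N + w ≤ l.length := hN N (by omega)
    have hNlen : N < l.length := by omega
    rw [List.range_succ]
    simp only [List.map_append, List.foldl_append, List.map_cons, List.map_nil,
      List.foldl_cons, List.foldl_nil]
    rw [ih (fun i hi => hN i (by omega))]
    have hcnt : ((l.drop N).take w).countP (fun c => decide (c ≠ "=")) = pvCnt l w N := rfl
    simp only [pvStepA]
    rw [hcnt, pv_slice_head l w N hw1 hNlen]
    by_cases hhl : pvHl l w margin N = true
    · have hs : (if pvTrig l w margin N then window else pvS l w margin window N) ≠ 0 :=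
        (pv_hl_iff l w margin window hw hwn N).2 hhl
      rw [if_pos hs]
      simp only [Prod.mk.injEq]
      refine ⟨?_, ?_⟩
      · simp [pvOut, hhl]
      · simp only [pvS]
        rw [if_pos hs]
    · have hs : ¬ ((if pvTrig l w margin N then window else pvS l w margin window N) ≠ 0) :=
        fun h => hhl ((pv_hl_iff l w margin window hw hwn N).1 h)
      rw [if_neg hs]
      simp only [Prod.mk.injEq]
      refine ⟨?_, ?_⟩
      · simp [pvOut, hhl]
      · simp only [pvS]
        rw [if_neg hs]

lemma pv_foldB (l : List String) (window margin : Int) (w : Nat)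
    (hw : 1 ≤ window) (hwn : (w : Int) = window) :
    ∀ N, (∀ i, i < N → i + w ≤ l.length) →
      (List.range N).foldl (pvStepB l w margin)
          (([] : List String), ((pvCnt l w 0 : Int), (none : Option Nat)))
        = ((List.range N).map (pvOut l w margin),
           ((pvCnt l w (N - 1) : Int), pvLast l w margin N)) := by
  intro N
  induction N with
  | zero => intro _; simp [pvLast]
  | succ N ih =>
    intro hN
    rw [List.range_succ]
    simp only [List.foldl_append, List.foldl_cons, List.foldl_nil, List.map_append,
      List.map_cons, List.map_nil]
    rw [ih (fun i hi => hN i (by omega))]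
    simp only [pvStepB]
    have hcnt : (if N > 0 then
        (pvCnt l w (N - 1) : Int) + (if l.getD (N + w - 1) "" ≠ "=" then 1 else 0)
          - (if l.getD (N - 1) "" ≠ "=" then 1 else 0)
        else (pvCnt l w (N - 1) : Int)) = (pvCnt l w N : Int) := by
      rcases N with _ | k
      · simp
      · have hk : k + w < l.length := by
          have := hN (k + 1) (by omega); omega
        have e := pv_cnt_slide l w k hk
        simp only [Nat.add_sub_cancel, gt_iff_lt, Nat.succ_pos, if_pos]
        rw [show k + 1 + w - 1 = k + w from by omega]
        omega
    rw [hcnt]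
    have hlast : (if (pvCnt l w N : Int) > margin then some N else pvLast l w margin N)
        = pvLast l w margin (N + 1) := by
      simp only [pvLast]
    rw [hlast]
    rfl

-- ===== VERDICT (by name: the statement is the Claim_ definition above) =====
theorem fuzzpro_print_spec : Claim_equal_fuzzpro_print := by
  intro l window margin _dom hpre
  unfold Spec_fuzzpro_print
  have hpre' : (1 : Int) ≤ window := hpre
  have hwn : ((window.toNat : Int)) = window := by omega
  have hw1 : 1 ≤ window.toNat := by omega
  simp only [fuzzpro_print, fuzzpro_print_alt]
  rw [pv_slidingWindow_eq l window.toNat hw1]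
  rw [pv_foldA l window margin window.toNat hpre' hwn (l.length + 1 - window.toNat)
    (fun i hi => by omega)]
  have hNb : ((l.length : Int) - window + 1).toNat = l.length + 1 - window.toNat := by omega
  rw [hNb]
  have hc0 : ((l.take window.toNat).countP (fun c => decide (c ≠ "=")) : Int)
      = (pvCnt l window.toNat 0 : Int) := rfl
  rw [hc0]
  rw [pv_foldB l window margin window.toNat hpre' hwn (l.length + 1 - window.toNat)
    (fun i hi => by omega)]
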